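-- pv_equiv track=rewrite | github.com/E-Aho/AdventOfCode2019 | 16/ScriptDay16.py | perform_large_phase
-- ===== SOURCE A (Python) =====
-- def perform_large_phase(offset_state):
--     out = []
--     last_num = 0
--     for i in range(len(offset_state)):
--         n = (last_num + offset_state[-(i + 1)]) % 10
--         out.append(n)
--         last_num = n
--     return out[::-1]
-- ===== SOURCE B (Python) =====
-- def perform_large_phase(offset_state):
--     total = sum(offset_state)
--     out = []
--     prefix = 0
--     for x in offset_state:
--         out.append((total - prefix) % 10)
--         prefix += x
--     return out
-- ===== Notes on version B (the rewrite author's own statement) =====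
-- stated objective: simpler
-- what changed: Replaces A's backward accumulate-with-negative-indexing plus final reversal by a single forward pass that subtracts a running prefix from the precomputed total sum and takes mod 10.
import Mathlib
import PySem

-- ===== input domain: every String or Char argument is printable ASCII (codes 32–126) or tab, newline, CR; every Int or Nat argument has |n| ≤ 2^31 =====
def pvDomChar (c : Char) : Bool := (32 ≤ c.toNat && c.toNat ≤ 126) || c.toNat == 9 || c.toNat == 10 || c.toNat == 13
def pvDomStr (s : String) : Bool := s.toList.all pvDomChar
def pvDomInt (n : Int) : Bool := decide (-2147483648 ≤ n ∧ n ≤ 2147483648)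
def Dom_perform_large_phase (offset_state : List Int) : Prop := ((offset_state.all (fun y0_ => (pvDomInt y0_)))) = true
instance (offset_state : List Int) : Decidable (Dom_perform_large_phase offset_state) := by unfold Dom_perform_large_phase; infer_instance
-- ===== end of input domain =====

-- B replaces A's backward accumulation with negative indexing plus a final reversal
-- by one forward pass subtracting a running prefix from the precomputed total (objective: simpler).

-- ===== PORT A =====
def perform_large_phase (offset_state : List Int) : List Int :=
  let st := (PySem.List.pyRange 0 offset_state.length 1).foldl
    (fun (acc : List Int × Int) i =>
      let n := PySem.Int.mod (acc.2 + PySem.List.pyGetD offset_state (-(i + 1)) 0) 10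
      (acc.1 ++ [n], n)) ([], 0)
  (PySem.List.slice? st.1 none none (-1)).getD []

-- ===== PORT B =====
def perform_large_phase_alt (offset_state : List Int) : List Int :=
  let total := offset_state.sum
  (offset_state.foldl
    (fun (acc : List Int × Int) x =>
      (acc.1 ++ [PySem.Int.mod (total - acc.2) 10], acc.2 + x)) ([], 0)).1

-- ===== PRECONDITION & SPEC =====
def Spec_perform_large_phase (offset_state : List Int) (out : List Int) : Prop := out = perform_large_phase_alt offset_state
instance (offset_state : List Int) (out : List Int) : Decidable (Spec_perform_large_phase offset_state out) := by unfold Spec_perform_large_phase; infer_instance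

-- ===== CLAIM (what is proved, stated in full; the proofs are below) =====
def Claim_equal_perform_large_phase : Prop := ∀ (offset_state : List Int), Dom_perform_large_phase offset_state → Spec_perform_large_phase offset_state (perform_large_phase offset_state)

-- ===== LEMMAS AND PROOFS =====

-- the values A's loop appends, consuming the reversed input with running state `s`
def aOut (s : Int) : List Int → List Int
  | [] => []
  | v :: r => PySem.Int.mod (s + v) 10 :: aOut (PySem.Int.mod (s + v) 10) r

-- the intended result: element for x is (s + x + sum of the rest) % 10
def shiftOut (s : Int) : List Int → List Int
  | [] => []
  | x :: r => PySem.Int.mod (s + x + r.sum) 10 :: shiftOut s r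

theorem mod_shift (a c : Int) : PySem.Int.mod (PySem.Int.mod a 10 + c) 10 = PySem.Int.mod (a + c) 10 := by
  rw [PySem.Int.mod_eq_emod_of_pos (by omega), PySem.Int.mod_eq_emod_of_pos (by omega),
      PySem.Int.mod_eq_emod_of_pos (by omega), Int.add_emod, Int.emod_emod_of_dvd _ (by norm_num), ← Int.add_emod]

theorem aFold (ys : List Int) (acc : List Int) (s : Int) :
    (ys.foldl (fun (a : List Int × Int) v =>
      (a.1 ++ [PySem.Int.mod (a.2 + v) 10], PySem.Int.mod (a.2 + v) 10)) (acc, s)).1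
    = acc ++ aOut s ys := by
  induction ys generalizing acc s with
  | nil => simp [aOut]
  | cons v r ih =>
    simp only [List.foldl_cons, aOut, ih, List.append_assoc, List.singleton_append]

theorem shiftOut_append (s v : Int) (zs : List Int) :
    shiftOut s (zs ++ [v]) = shiftOut (PySem.Int.mod (s + v) 10) zs ++ [PySem.Int.mod (s + v) 10] := by
  induction zs with
  | nil => simp [shiftOut]
  | cons z w ih =>
    simp only [List.cons_append, shiftOut, ih, List.sum_append, List.sum_cons, List.sum_nil,
      add_zero]
    congr 1
    rw [show PySem.Int.mod (s + v) 10 + z + w.sum = PySem.Int.mod (s + v) 10 + (z + w.sum) from by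
      ring, mod_shift]
    congr 1
    ring

theorem aOut_rev (ys : List Int) (s : Int) :
    (aOut s ys).reverse = shiftOut s ys.reverse := by
  induction ys generalizing s with
  | nil => simp [aOut, shiftOut]
  | cons v r ih =>
    simp only [aOut, List.reverse_cons, ih, shiftOut_append]

theorem bFold (xs : List Int) (total p : Int) (acc : List Int) :
    (xs.foldl (fun (a : List Int × Int) x =>
      (a.1 ++ [PySem.Int.mod (total - a.2) 10], a.2 + x)) (acc, p)).1
    = acc ++ shiftOut (total - p - xs.sum) xs := by
  induction xs generalizing p acc with
  | nil => simp [shiftOut]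
  | cons x r ih =>
    simp only [List.foldl_cons, ih, shiftOut, List.sum_cons, List.append_assoc, List.singleton_append]
    congr 2
    · ring_nf
    · have : total - p - (x + r.sum) = total - (p + x) - r.sum := by ring
      rw [this]

theorem getD_rev_eq (xs : List Int) (i : Int) (hi0 : 0 ≤ i) (hilt : i < (xs.length : Int)) :
    PySem.List.pyGetD xs (-(i + 1)) 0 = PySem.List.pyGetD xs.reverse i 0 := by
  have hk : (-(i + 1)) = -((i.toNat + 1 : Nat) : Int) := by push_cast; omega
  rw [hk, PySem.List.pyGetD_neg_natCast xs (i.toNat + 1) 0 (by omega) (by omega)]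
  rw [PySem.List.pyGetD_eq_getElem (xs := xs.reverse) (i := i) (d := 0) hi0
        (by simpa using hilt)]
  rw [List.getElem_reverse]
  congr 1
  omega

-- ===== VERDICT (by name: the statement is the Claim_ definition above) =====
theorem perform_large_phase_spec : Claim_equal_perform_large_phase := by
  intro xs _
  show perform_large_phase xs = perform_large_phase_alt xs
  unfold perform_large_phase perform_large_phase_alt
  simp only []
  have hcongr :
      (PySem.List.pyRange 0 xs.length 1).foldl
        (fun (acc : List Int × Int) i =>
          (acc.1 ++ [PySem.Int.mod (acc.2 + PySem.List.pyGetD xs (-(i + 1)) 0) 10],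
           PySem.Int.mod (acc.2 + PySem.List.pyGetD xs (-(i + 1)) 0) 10)) ([], 0)
    = (PySem.List.pyRange 0 xs.reverse.length 1).foldl
        (fun (acc : List Int × Int) i =>
          (acc.1 ++ [PySem.Int.mod (acc.2 + PySem.List.pyGetD xs.reverse i 0) 10],
           PySem.Int.mod (acc.2 + PySem.List.pyGetD xs.reverse i 0) 10)) ([], 0) := by
    rw [List.length_reverse]
    apply PySem.List.foldl_congr_mem
    intro acc i hi
    have hmem := (PySem.List.mem_pyRange_one).mp hi
    rw [getD_rev_eq xs i (by omega) (by simpa using hmem.2)]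
  rw [hcongr, PySem.List.foldl_pyRange_zero_pyGetD' xs.reverse 0
        (fun (acc : List Int × Int) v =>
          (acc.1 ++ [PySem.Int.mod (acc.2 + v) 10], PySem.Int.mod (acc.2 + v) 10)) ([], 0)]
  rw [aFold, bFold]
  simp only [List.nil_append, PySem.List.slice?_none_none_neg_one, Option.getD_some]
  rw [aOut_rev, List.reverse_reverse]
  congr 1
  ring
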